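-- pv_equiv track=rewrite | github.com/Scalino1984/video-editor | src/video/editor.py | _extract_ffmpeg_error
-- ===== SOURCE A (Python) =====
-- def _extract_ffmpeg_error(stderr_text: str) -> str:
--     """Extract meaningful error from ffmpeg stderr (strip banner/config)."""
--     err_lines = stderr_text.strip().split("\n")
--     useful = []
--     skip_banner = True
--     for line in err_lines:
--         if skip_banner:
--             if any(x in line for x in (
--                 "--enable-", "--disable-", "configuration:", "built with",
--                 "ffmpeg version", "Copyright",
--             )):
--                 continue
--             if line.strip().startswith("lib") and "/" in line:
--                 continue
--             skip_banner = False
--         useful.append(line)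
--     return "\n".join(useful[-15:]) if useful else stderr_text[-500:]
-- ===== SOURCE B (Python) =====
-- def _extract_ffmpeg_error(stderr_text: str) -> str:
--     """Extract meaningful error from ffmpeg stderr (strip banner/config)."""
--     banners = ("--enable-", "--disable-", "configuration:", "built with",
--                "ffmpeg version", "Copyright")
--
--     def is_banner(line):
--         return (any(x in line for x in banners)
--                 or (line.strip().startswith("lib") and "/" in line))
--
--     lines = stderr_text.strip().split("\n")
--     flags = [is_banner(l) for l in lines]
--     # a line belongs to the banner header exactly when every line up to and
--     # including it is banner-like: keep the rest via a prefix-mask filter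
--     useful = [l for k, l in enumerate(lines) if not all(flags[:k + 1])]
--     return "\n".join(useful[-15:]) if useful else stderr_text[-500:]
-- ===== Notes on version B (the rewrite author's own statement) =====
-- stated objective: alternative
-- what changed: Replaces A's stateful skip_banner flag loop by two staged passes: a per-line banner-flag list, then a comprehension that keeps a line exactly when not all flags up to it are set (a prefix-conjunction mask), so no mutable flag is threaded through the loop.
import Mathlib
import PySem

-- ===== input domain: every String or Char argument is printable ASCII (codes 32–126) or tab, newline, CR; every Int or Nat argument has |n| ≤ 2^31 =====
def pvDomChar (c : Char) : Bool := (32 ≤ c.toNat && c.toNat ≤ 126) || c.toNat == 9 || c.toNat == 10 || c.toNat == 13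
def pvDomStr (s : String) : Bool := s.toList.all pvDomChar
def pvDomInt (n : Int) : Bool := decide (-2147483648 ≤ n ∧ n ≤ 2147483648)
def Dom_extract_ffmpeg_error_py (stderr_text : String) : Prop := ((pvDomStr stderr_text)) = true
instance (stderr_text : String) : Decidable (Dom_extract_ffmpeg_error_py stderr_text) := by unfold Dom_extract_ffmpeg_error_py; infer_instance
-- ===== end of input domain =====

-- B replaces A's stateful skip_banner flag loop by two staged passes: a per-line banner-flag
-- list, then a prefix-conjunction mask filter keeping a line iff not all flags up to it hold.

-- ===== PORT A =====
def bannersA : List String :=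
  ["--enable-", "--disable-", "configuration:", "built with", "ffmpeg version", "Copyright"]

-- A's loop body: carry (useful, skip_banner) through the fold
def stepA (st : List String × Bool) (line : String) : List String × Bool :=
  if st.2 then
    if bannersA.any (fun x => PySem.Str.isIn x line) then st
    else if PySem.Str.startswith (PySem.Str.strip line) "lib" && PySem.Str.isIn "/" line then st
    else (st.1 ++ [line], false)
  else (st.1 ++ [line], st.2)

def extract_ffmpeg_error_py (stderr_text : String) : String :=
  let err_lines := (PySem.Str.split? (PySem.Str.strip stderr_text) "\n").getD []  -- sep ≠ "", so split? is exact here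
  let st := err_lines.foldl stepA ([], true)
  if st.1 ≠ [] then PySem.Str.join "\n" (PySem.List.slice st.1 (some (-15)) none)
  else PySem.Str.slice stderr_text (some (-500)) none

-- ===== PORT B =====
def bannersB : List String :=
  ["--enable-", "--disable-", "configuration:", "built with", "ffmpeg version", "Copyright"]

def is_banner (line : String) : Bool :=
  bannersB.any (fun x => PySem.Str.isIn x line) ||
  (PySem.Str.startswith (PySem.Str.strip line) "lib" && PySem.Str.isIn "/" line)

def extract_ffmpeg_error_py_alt (stderr_text : String) : String :=
  let lines := (PySem.Str.split? (PySem.Str.strip stderr_text) "\n").getD []  -- sep ≠ "", so split? is exact here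
  let flags := lines.map is_banner
  -- Source B: useful = [l for k, l in enumerate(lines) if not all(flags[:k+1])]
  let useful := ((PySem.List.enumerate lines).filter
      (fun p => !(PySem.List.slice flags none (some (p.1 + 1))).all id)).map (·.2)
  if useful ≠ [] then PySem.Str.join "\n" (PySem.List.slice useful (some (-15)) none)
  else PySem.Str.slice stderr_text (some (-500)) none

-- ===== PRECONDITION & SPEC =====
def Spec_extract_ffmpeg_error_py (stderr_text : String) (out : String) : Prop := out = extract_ffmpeg_error_py_alt stderr_text
instance (stderr_text : String) (out : String) : Decidable (Spec_extract_ffmpeg_error_py stderr_text out) := by unfold Spec_extract_ffmpeg_error_py; infer_instance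

-- ===== CLAIM =====
def Claim_equal_extract_ffmpeg_error_py : Prop := ∀ (stderr_text : String), Dom_extract_ffmpeg_error_py stderr_text → Spec_extract_ffmpeg_error_py stderr_text (extract_ffmpeg_error_py stderr_text)

-- ===== LEMMAS AND PROOFS =====

theorem bannersA_eq : bannersA = bannersB := rfl

-- once the flag is down, A just appends everything
theorem foldA_false (l : List String) (acc : List String) :
    l.foldl stepA (acc, false) = (acc ++ l, false) := by
  induction l generalizing acc with
  | nil => simp
  | cons h t ih => simp [stepA, ih]

-- A's flag-up step is the one-predicate banner test
theorem stepA_true (acc : List String) (line : String) :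
    stepA (acc, true) line = if is_banner line then (acc, true) else (acc ++ [line], false) := by
  unfold stepA is_banner
  rw [← bannersA_eq]
  cases hc1 : (bannersA.any fun x => PySem.Str.isIn x line) <;>
    cases hc2 : (PySem.Str.startswith (PySem.Str.strip line) "lib" && PySem.Str.isIn "/" line) <;>
      simp

-- with the flag up, A's loop collects exactly acc ++ dropWhile is_banner
theorem foldA_true (l : List String) (acc : List String) :
    (l.foldl stepA (acc, true)).1 = acc ++ l.dropWhile is_banner := by
  induction l generalizing acc with
  | nil => simp
  | cons h t ih =>
    rw [List.foldl_cons, stepA_true, List.dropWhile_cons]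
    by_cases hb : is_banner h = true
    · simp [hb, ih]
    · simp [hb, foldA_false]

-- B's prefix-mask filter, generalized over an already-consumed all-true flag prefix `pre`
theorem maskAux (pre : List Bool) (hpre : pre.all id = true) (l : List String) :
    ((PySem.List.enumerate l (pre.length : Int)).filter
        (fun p => !(PySem.List.slice (pre ++ l.map is_banner) none (some (p.1 + 1))).all id)).map (·.2)
      = l.dropWhile is_banner := by
  induction l generalizing pre with
  | nil => simp [PySem.List.enumerate]
  | cons h t ih =>
    rw [PySem.List.enumerate_cons, List.filter_cons]
    have hslice : PySem.List.slice (pre ++ (h :: t).map is_banner) none (some ((pre.length : Int) + 1))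
        = pre ++ [is_banner h] := by
      have : ((pre.length : Int) + 1) = ((pre.length + 1 : Nat) : Int) := by push_cast; ring
      rw [this, PySem.List.slice_to_natCast]
      have : pre ++ (h :: t).map is_banner = (pre ++ [is_banner h]) ++ t.map is_banner := by simp
      rw [this]
      have hl : pre.length + 1 = (pre ++ [is_banner h]).length := by simp
      rw [hl, List.take_left]
    by_cases hb : is_banner h = true
    · -- banner head: filtered out; recurse with pre ++ [true]
      have hcond : (!(PySem.List.slice (pre ++ (h :: t).map is_banner) none
          (some (((pre.length : Int), h).1 + 1))).all id) = false := by
        simp only [hslice]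
        simp [List.all_append, hpre, hb]
      rw [hcond]
      simp only [List.dropWhile_cons, hb, if_true]
      have hpre' : (pre ++ [is_banner h]).all id = true := by
        simp [List.all_append, hpre, hb]
      have := ih (pre ++ [is_banner h]) hpre'
      simp only [List.length_append, List.length_cons, List.length_nil] at this
      have harr : pre ++ (h :: t).map is_banner = (pre ++ [is_banner h]) ++ t.map is_banner := by simp
      rw [harr]
      have hc : ((pre.length : Int) + 1) = (((pre.length + 1 : Nat)) : Int) := by push_cast; ring
      rw [hc]
      simpa using this
    · -- first non-banner line: this and every later line is kept
      have hbf : is_banner h = false := by simpa using hb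
      have hcond : (!(PySem.List.slice (pre ++ (h :: t).map is_banner) none
          (some (((pre.length : Int), h).1 + 1))).all id) = true := by
        simp only [hslice]
        simp [List.all_append, hbf]
      rw [hcond]
      -- all later prefixes contain the false flag at position pre.length, so filter keeps all
      have hall : ∀ p ∈ PySem.List.enumerate t ((pre.length : Int) + 1),
          (!(PySem.List.slice (pre ++ false :: t.map is_banner) none (some (p.1 + 1))).all id) = true := by
        intro p hp
        obtain ⟨k, hk, rfl⟩ := (PySem.List.mem_enumerate_iff _ _ _).mp hp
        have hc : ((pre.length : Int) + 1 + (k : Int) + 1) = ((pre.length + (k + 2) : Nat) : Int) := by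
          push_cast; ring
        simp only [hc]
        rw [PySem.List.slice_to_natCast]
        rw [List.take_append]
        simp [List.all_append, List.take_succ_cons]
      simp only [List.map_cons, hbf]
      simp [hbf, List.filter_eq_self.mpr hall, PySem.List.map_snd_enumerate]

-- ===== VERDICT =====
theorem extract_ffmpeg_error_py_spec : Claim_equal_extract_ffmpeg_error_py := by
  intro s _
  unfold Spec_extract_ffmpeg_error_py extract_ffmpeg_error_py extract_ffmpeg_error_py_alt
  have hm := maskAux [] rfl ((PySem.Str.split? (PySem.Str.strip s) "\n").getD [])
  simp only [List.nil_append, List.length_nil, Nat.cast_zero] at hm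
  simp only [foldA_true, List.nil_append, hm]
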